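-- pv_equiv track=rewrite | github.com/lacithelaci/oktatas | erettsegi/2014 május/cimek.py | fuggveny2
-- ===== SOURCE A (Python) =====
-- def fuggveny2(a):
--     masz = 0
--     jelenlegi = 0
--     el = ""
--     jel = ""
--     b = a.strip().split(":")
--     for i in b:
--         jel = i
--         if jel == "0" and jel == el:
--             jelenlegi += 1
--         else:
--             jelenlegi = 0
--         if jelenlegi > masz:
--             masz = jelenlegi
--         el = jel
--
--     semmi = ""
--     if masz>=1:
--         for i in range(0, masz + 1):
--             semmi += ":"
--             semmi += "0"
--         a = a.replace(semmi, ":", 1)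
--
--         return a[0:-1]
--     else:
--         return a
-- ===== SOURCE B (Python) =====
-- def fuggveny2(a):
--     s = a.strip()
--     w = ":" + s + ":"
--     maxrun = 0
--     for k in range(1, len(s) + 2):
--         if ":" + "0:" * k in w:
--             maxrun = k
--     if maxrun >= 2:
--         return a.replace(":0" * maxrun, ":", 1)[:-1]
--     return a
-- ===== Notes on version B (the rewrite author's own statement) =====
-- stated objective: alternative
-- what changed: A scans the split token list with a previous-token/run-counter state machine and rebuilds the replacement pattern with a loop; B never walks tokens: it probes the colon-wrapped stripped string for increasingly long repeated zero-token substrings to find the longest run, then does the same single replace on the original string and drops the last character.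
import Mathlib
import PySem

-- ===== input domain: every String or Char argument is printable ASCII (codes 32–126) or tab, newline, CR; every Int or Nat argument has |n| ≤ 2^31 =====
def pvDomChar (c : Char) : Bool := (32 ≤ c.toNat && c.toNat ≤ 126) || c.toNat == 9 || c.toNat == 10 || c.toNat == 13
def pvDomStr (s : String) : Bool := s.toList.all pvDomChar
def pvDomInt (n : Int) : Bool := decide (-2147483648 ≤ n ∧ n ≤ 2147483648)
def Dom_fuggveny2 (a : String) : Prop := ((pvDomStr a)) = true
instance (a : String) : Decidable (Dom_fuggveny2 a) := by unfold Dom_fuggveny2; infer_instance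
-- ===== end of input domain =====

-- B replaces A's stateful previous-token scan over the split tokens by direct substring
-- probing (":" + "0:"*k in ":"+s+":") for the longest zero-token run; objective: alternative
-- (same final replace-on-original-string and tail drop, so the return value is identical).

-- ===== PORT A =====
-- Python s.replace(old, new, 1): splice `new` over the FIRST occurrence of `old`
-- (exact: occurrence found with PySem.Chars.find; old = [] inserts new at the front, as CPython does)
def pvReplaceOnce (s old new : List Char) : List Char :=
  let i := PySem.Chars.find s old
  if i = -1 then s else (s.take i.toNat ++ new) ++ s.drop (i.toNat + old.length)

-- the body of A's `for i in b:` loop, state (masz, jelenlegi, el)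
def pvStepA (st : Int × Int × List Char) (i : List Char) : Int × Int × List Char :=
  let jel := i
  let jelenlegi := if jel = ['0'] ∧ jel = st.2.2 then st.2.1 + 1 else 0
  let masz := if jelenlegi > st.1 then jelenlegi else st.1
  (masz, jelenlegi, jel)

def fuggveny2 (a : String) : String :=
  let b := PySem.Chars.splitOn (PySem.Chars.strip a.toList) [':']
  let st := b.foldl pvStepA (0, 0, ([] : List Char))
  let masz := st.1
  if masz ≥ 1 then
    let semmi := (PySem.List.pyRange 0 (masz + 1) 1).foldl
        (fun s _ => (s ++ [':']) ++ ['0']) ([] : List Char)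
    String.ofList (PySem.Chars.slice (pvReplaceOnce a.toList semmi [':']) (some 0) (some (-1)))
  else a

-- ===== PORT B =====
-- the body of B's `for k in range(1, len(s) + 2):` loop
def pvStepB (w : List Char) (m k : Int) : Int :=
  if PySem.Chars.isIn ([':'] ++ PySem.List.pyRepeat ['0', ':'] k) w then k else m

def fuggveny2_alt (a : String) : String :=
  let s := PySem.Chars.strip a.toList
  let w := ([':'] ++ s) ++ [':']
  let maxrun := (PySem.List.pyRange 1 ((s.length : Int) + 2) 1).foldl (pvStepB w) 0
  if maxrun ≥ 2 then
    String.ofList (PySem.Chars.slice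
      (pvReplaceOnce a.toList (PySem.List.pyRepeat [':', '0'] maxrun) [':']) none (some (-1)))
  else a

-- ===== PRECONDITION & SPEC =====
def Spec_fuggveny2 (a : String) (out : String) : Prop := out = fuggveny2_alt a
instance (a : String) (out : String) : Decidable (Spec_fuggveny2 a out) := by unfold Spec_fuggveny2; infer_instance

-- ===== CLAIM (what is proved, stated in full; the proofs are below) =====
def Claim_equal_fuggveny2 : Prop := ∀ (a : String), Dom_fuggveny2 a → Spec_fuggveny2 a (fuggveny2 a)

-- ===== LEMMAS AND PROOFS =====

-- structural model of s.split(":"): accumulate the current token, cut at each ':'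
def pvSplit (cur : List Char) : List Char → List (List Char)
  | [] => [cur]
  | c :: rest => if c = ':' then cur :: pvSplit [] rest else pvSplit (cur ++ [c]) rest

-- length of the leading run of "0" tokens
def pvLead : List (List Char) → Nat
  | [] => 0
  | t :: ts => if t = ['0'] then pvLead ts + 1 else 0

-- length of the longest run of "0" tokens
def pvMr : List (List Char) → Nat
  | [] => 0
  | t :: ts => max (pvLead (t :: ts)) (pvMr ts)

-- "0:" repeated n times
def pvRep (n : Nat) : List Char := (List.replicate n ['0', ':']).flatten

-- the tokens re-joined, each followed by ':'
def pvW (ts : List (List Char)) : List Char := ts.flatMap (fun t => t ++ [':'])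

-- A's loop, read forward: maximum the masz accumulator will reach from state (·, c, e)
def pvLA (e : List Char) (c : Int) : List (List Char) → Int
  | [] => 0
  | t :: ts =>
    let c' := if t = ['0'] ∧ t = e then c + 1 else 0
    max c' (pvLA t c' ts)

theorem pvSplit_go (fuel : Nat) : ∀ (l cur : List Char) (acc : List (List Char)),
    l.length ≤ fuel →
    PySem.Chars.splitOn.go [':'] fuel l cur acc = acc.reverse ++ pvSplit cur.reverse l := by
  induction fuel with
  | zero =>
    intro l cur acc h
    have hl : l = [] := List.eq_nil_of_length_eq_zero (Nat.le_zero.mp h)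
    subst hl
    rw [PySem.Chars.splitOn.go.eq_def]
    simp [pvSplit]
  | succ fuel ih =>
    intro l cur acc h
    cases l with
    | nil =>
      rw [PySem.Chars.splitOn.go.eq_def]
      simp [pvSplit]
    | cons c rest =>
      rw [PySem.Chars.splitOn.go.eq_def]
      dsimp only
      by_cases hc : c = ':'
      · subst hc
        have hp : [':'].isPrefixOf (':' :: rest) = true := by simp [List.isPrefixOf]
        rw [if_pos hp, show List.drop [':'].length (':' :: rest) = rest from rfl,
          ih rest [] (cur.reverse :: acc) (by simpa using Nat.le_of_succ_le_succ h)]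
        simp [pvSplit]
      · have hp : [':'].isPrefixOf (c :: rest) = false := by
          simpa [List.isPrefixOf] using (Ne.symm hc)
        rw [if_neg (by simp [hp])]
        rw [ih rest (c :: cur) acc (by simpa using Nat.le_of_succ_le_succ h)]
        simp [pvSplit, hc]


theorem pvSplitOn_eq (s : List Char) :
    PySem.Chars.splitOn s [':'] = pvSplit [] s := by
  unfold PySem.Chars.splitOn
  rw [pvSplit_go (s.length + 1) s [] [] (by omega)]
  simp


theorem pvW_pvSplit (l : List Char) : ∀ cur, pvW (pvSplit cur l) = cur ++ l ++ [':'] := by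
  induction l with
  | nil => intro cur; simp [pvSplit, pvW]
  | cons c rest ih =>
    intro cur
    by_cases hc : c = ':'
    · subst hc
      simp [pvSplit, pvW] at ih ⊢
      rw [ih []]
      simp
    · simp [pvSplit, hc]
      rw [ih (cur ++ [c])]
      simp


theorem pvSplit_noColon (l : List Char) : ∀ cur, ':' ∉ cur →
    ∀ t ∈ pvSplit cur l, ':' ∉ t := by
  induction l with
  | nil => intro cur hcur t ht; simp [pvSplit] at ht; subst ht; exact hcur
  | cons c rest ih =>
    intro cur hcur t ht
    by_cases hc : c = ':'
    · subst hc
      simp [pvSplit] at ht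
      rcases ht with h | h
      · subst h; exact hcur
      · exact ih [] (by simp) t h
    · simp [pvSplit, hc] at ht
      refine ih (cur ++ [c]) ?_ t ht
      intro hmem
      rcases List.mem_append.mp hmem with h | h
      · exact hcur h
      · simp at h; exact hc h.symm


theorem pvSplit_length (l : List Char) : ∀ cur, (pvSplit cur l).length ≤ l.length + 1 := by
  induction l with
  | nil => intro cur; simp [pvSplit]
  | cons c rest ih =>
    intro cur
    by_cases hc : c = ':'
    · subst hc
      simp [pvSplit]
      have := ih []
      omega
    · simp [pvSplit, hc]
      have := ih (cur ++ [c])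
      omega


theorem pvFoldA (ts : List (List Char)) : ∀ (b c : Int) (e : List Char), 0 ≤ b → 0 ≤ c →
    (ts.foldl pvStepA (b, c, e)).1 = max b (pvLA e c ts) := by
  induction ts with
  | nil => intro b c e hb hc; simp [pvLA]; omega
  | cons t ts ih =>
    intro b c e hb hc
    simp only [List.foldl_cons, pvLA]
    have hstep : pvStepA (b, c, e) t
        = (max b (if t = ['0'] ∧ t = e then c + 1 else 0),
           (if t = ['0'] ∧ t = e then c + 1 else 0), t) := by
      simp only [pvStepA]
      split_ifs with h1 h2 h2 <;> simp_all <;> omega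
    rw [hstep]
    rw [ih _ _ _ (by omega) (by split_ifs <;> omega)]
    · omega


theorem pvLA_eq (ts : List (List Char)) : ∀ (e : List Char) (c : Int), 0 ≤ c →
    pvLA e c ts = max (if e = ['0'] ∧ pvLead ts ≠ 0 then c + (pvLead ts : Int) else 0)
      ((pvMr ts - 1 : Nat) : Int) := by
  induction ts with
  | nil => intro e c hc; simp [pvLA, pvLead, pvMr]
  | cons t ts ih =>
    intro e c hc
    by_cases ht : t = ['0']
    · subst ht
      by_cases he : e = ['0']
      · subst he
        simp only [pvLA]
        rw [if_pos (by simp), ih ['0'] (c + 1) (by omega)]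
        by_cases hl : pvLead ts = 0 <;> simp [pvLead, pvMr, hl] <;> omega
      · simp only [pvLA]
        rw [if_neg (by rintro ⟨-, h2⟩; exact he h2.symm), ih ['0'] 0 le_rfl]
        by_cases hl : pvLead ts = 0 <;> simp [pvLead, pvMr, hl, he] <;> omega
    · simp only [pvLA]
      rw [if_neg (by rintro ⟨h1, -⟩; exact ht h1), ih t 0 le_rfl]
      simp [pvLead, pvMr, ht]

theorem pvRep_length (k : Nat) : (pvRep k).length = 2 * k := by
  induction k with
  | zero => simp [pvRep]
  | succ k ih => simp [pvRep, List.replicate_succ] at ih ⊢; omega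

theorem pvRep_succ (k : Nat) : pvRep (k + 1) = '0' :: ':' :: pvRep k := by
  simp [pvRep, List.replicate_succ]

theorem pvPrefix_iff (ts : List (List Char)) : (∀ t ∈ ts, ':' ∉ t) → ∀ k : Nat,
    (pvRep k <+: pvW ts ↔ k ≤ pvLead ts) := by
  induction ts with
  | nil =>
    intro _ k
    cases k with
    | zero => simp [pvRep, pvW, pvLead]
    | succ k => simp [pvW, pvLead, pvRep_succ]
  | cons t ts ih =>
    intro htok k
    have ht : ':' ∉ t := htok t (List.mem_cons_self ..)
    have htok' : ∀ u ∈ ts, ':' ∉ u := fun u hu => htok u (List.mem_cons_of_mem _ hu)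
    cases k with
    | zero => simp [pvRep]
    | succ k =>
      have hW : pvW (t :: ts) = t ++ (':' :: pvW ts) := by simp [pvW]
      rw [hW, pvRep_succ]
      rcases t with _ | ⟨c, _ | ⟨c', t''⟩⟩
      · simp [pvLead, List.cons_prefix_cons]
      · by_cases hc0 : c = '0'
        · subst hc0
          simp only [List.cons_append, List.nil_append, List.cons_prefix_cons, true_and]
          rw [ih htok' k]
          simp [pvLead]
        · simp [List.cons_prefix_cons, pvLead, hc0, Ne.symm hc0]
      · have hc' : ¬':' = c' := fun h => ht (by simp [← h])
        simp [List.cons_prefix_cons, pvLead, hc']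

theorem pvSkip (t : List Char) (rest pat : List Char) (ht : ':' ∉ t) :
    (':' :: pat <:+: t ++ rest) ↔ (':' :: pat <:+: rest) := by
  constructor
  · intro h
    induction t with
    | nil => simpa using h
    | cons c t' ihh =>
      have hc : ':' ≠ c := fun hcc => ht (by simp [← hcc])
      rcases List.infix_cons_iff.mp (by simpa using h) with hp | hi
      · exact absurd (List.cons_prefix_cons.mp hp).1 hc
      · exact ihh (fun hm => ht (List.mem_cons_of_mem _ hm)) hi
  · intro h
    exact h.trans (List.suffix_append t rest).isInfix


theorem pvInfix_iff (ts : List (List Char)) : (∀ t ∈ ts, ':' ∉ t) → ∀ k : Nat, 1 ≤ k →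
    ((':' :: pvRep k) <:+: (':' :: pvW ts) ↔ k ≤ pvMr ts) := by
  induction ts with
  | nil =>
    intro _ k hk
    simp only [pvW, List.flatMap_nil, pvMr]
    constructor
    · intro h
      have hlen := h.length_le
      simp [pvRep_length k] at hlen
      omega
    · intro h
      exact absurd (le_trans hk h) (by omega)
  | cons t ts ih =>
    intro htok k hk
    have ht : ':' ∉ t := htok t (List.mem_cons_self ..)
    have htok' : ∀ u ∈ ts, ':' ∉ u := fun u hu => htok u (List.mem_cons_of_mem _ hu)
    have hW : pvW (t :: ts) = t ++ (':' :: pvW ts) := by simp [pvW]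
    rw [hW, List.infix_cons_iff]
    have h1 : (':' :: pvRep k <+: ':' :: (t ++ (':' :: pvW ts))) ↔ k ≤ pvLead (t :: ts) := by
      rw [List.cons_prefix_cons]
      have hp := pvPrefix_iff (t :: ts) htok k
      rw [hW] at hp
      simp [hp]
    have h2 : (':' :: pvRep k <:+: t ++ (':' :: pvW ts)) ↔ k ≤ pvMr ts := by
      rw [pvSkip t _ _ ht]
      exact ih htok' k hk
    rw [h1, h2]
    simp only [pvMr]
    omega

theorem pvMr_le (ts : List (List Char)) : pvMr ts ≤ ts.length := by
  have hlead : ∀ us : List (List Char), pvLead us ≤ us.length := by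
    intro us
    induction us with
    | nil => simp [pvLead]
    | cons u us ih => simp only [pvLead, List.length_cons]; split_ifs <;> omega
  induction ts with
  | nil => simp [pvMr]
  | cons t ts ih =>
    simp only [pvMr, List.length_cons]
    have := hlead (t :: ts)
    simp only [List.length_cons] at this
    omega


theorem pvFoldB (ts : List (List Char)) (htok : ∀ t ∈ ts, ':' ∉ t) :
    ∀ n : Nat, (PySem.List.pyRange 1 (1 + (n : Int)) 1).foldl (pvStepB (':' :: pvW ts)) 0
      = min (pvMr ts : Int) n := by
  intro n
  induction n with
  | zero =>
    have h0 : PySem.List.pyRange 1 (1 + ((0 : Nat) : Int)) 1 = [] := by rfl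
    rw [h0]
    simp
  | succ n ihn =>
    have hcast : (1 + ((n + 1 : Nat) : Int)) = (1 + (n : Nat)) + 1 := by push_cast; ring
    rw [hcast, PySem.List.pyRange_one_succ_right (by omega), List.foldl_append, ihn]
    simp only [List.foldl_cons, List.foldl_nil]
    unfold pvStepB
    have hpat : [':'] ++ PySem.List.pyRepeat ['0', ':'] (1 + (n : Nat)) = ':' :: pvRep (n + 1) := by
      have : ((1 + (n : Nat)) : Int).toNat = n + 1 := by omega
      simp [PySem.List.pyRepeat, pvRep, this]
    rw [hpat]
    by_cases hle : n + 1 ≤ pvMr ts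
    · have hin : PySem.Chars.isIn (':' :: pvRep (n + 1)) (':' :: pvW ts) = true :=
        (PySem.Chars.isIn_iff_infix _ _).mpr ((pvInfix_iff ts htok (n + 1) (by omega)).mpr hle)
      rw [if_pos hin]
      omega
    · have hni : PySem.Chars.isIn (':' :: pvRep (n + 1)) (':' :: pvW ts) = false :=
        (PySem.Chars.isIn_eq_false_iff _ _).mpr
          (fun h => hle ((pvInfix_iff ts htok (n + 1) (by omega)).mp h))
      rw [if_neg (by simp [hni])]
      omega


theorem pvSemmi (l : List Int) : ∀ init : List Char,
    l.foldl (fun s _ => (s ++ [':']) ++ ['0']) init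
      = init ++ (List.replicate l.length [':', '0']).flatten := by
  induction l with
  | nil => intro init; simp
  | cons x l ih =>
    intro init
    simp only [List.foldl_cons, List.length_cons, List.replicate_succ]
    rw [ih]
    simp


theorem pvSliceZero (x : List Char) :
    PySem.Chars.slice x (some 0) (some (-1)) = PySem.Chars.slice x none (some (-1)) := by
  simp [PySem.Chars.slice_eq_listSlice, PySem.List.slice, PySem.List.clampIdx]


-- ===== VERDICT (by name: the statement is the Claim_ definition above) =====
theorem fuggveny2_spec : Claim_equal_fuggveny2 := by
  unfold Claim_equal_fuggveny2
  intro a _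
  unfold Spec_fuggveny2
  simp only [fuggveny2, fuggveny2_alt]
  rw [pvSplitOn_eq]
  set s := PySem.Chars.strip a.toList with hs
  set ts := pvSplit [] s with hts
  have htok : ∀ t ∈ ts, ':' ∉ t := pvSplit_noColon s [] (by simp)
  have hW : pvW ts = s ++ [':'] := by simpa using pvW_pvSplit s []
  have hmasz : (List.foldl pvStepA (0, 0, ([] : List Char)) ts).1
      = ((pvMr ts - 1 : Nat) : Int) := by
    rw [pvFoldA ts 0 0 [] le_rfl le_rfl, pvLA_eq ts [] 0 le_rfl]
    simp
  have hw2 : ([':'] ++ s) ++ [':'] = ':' :: pvW ts := by simp [hW]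
  have hmax : (PySem.List.pyRange 1 ((s.length : Int) + 2) 1).foldl
      (pvStepB (([':'] ++ s) ++ [':'])) 0 = (pvMr ts : Int) := by
    rw [hw2]
    have h1 : ((s.length : Int) + 2) = 1 + ((s.length + 1 : Nat) : Int) := by push_cast; ring
    rw [h1, pvFoldB ts htok (s.length + 1)]
    have h2 : pvMr ts ≤ s.length + 1 :=
      le_trans (pvMr_le ts) (pvSplit_length s [])
    omega
  rw [hmasz, hmax]
  by_cases hm : 2 ≤ pvMr ts
  · rw [if_pos (by omega), if_pos (by omega)]
    have hlen1 : ((pvMr ts - 1 : Nat) : Int) + 1 = ((pvMr ts : Nat) : Int) := by omega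
    rw [hlen1, PySem.List.pyRange_zero_natCast (pvMr ts), pvSemmi]
    have hrep : PySem.List.pyRepeat [':', '0'] ((pvMr ts : Nat) : Int)
        = (List.replicate (pvMr ts) [':', '0']).flatten := by
      simp [PySem.List.pyRepeat]
    rw [hrep, pvSliceZero]
    simp
  · rw [if_neg (by omega), if_neg (by omega)]
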